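-- pv_equiv track=rewrite | github.com/pypi-data/pypi-mirror-93 | packages/m2c/m2c-0.4.2.tar.gz/m2c-0.4.2/m2c/helper.py | upperFirst
-- ===== SOURCE A (Python) =====
-- def upperFirst(s):
--     if len(s) in (0, 1):
--         return s.upper()
--     if '_' in s:
--         items = s.split('_')
--         name = ''
--         for item in items:
--             name += upperFirst(item)
--         return name
--     return s[0].upper() + s[1:]
-- ===== SOURCE B (Python) =====
-- def upperFirst(s):
--     if len(s) <= 1:
--         return s.upper()
--     out = []
--     at_start = True
--     for ch in s:
--         if ch == '_':
--             at_start = True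
--         elif at_start:
--             out.append(ch.upper())
--             at_start = False
--         else:
--             out.append(ch)
--     return ''.join(out)
-- ===== Notes on version B (the rewrite author's own statement) =====
-- stated objective: alternative
-- what changed: Replaced A's split-on-underscore plus recursive per-segment capitalization with a single flat scan over the characters keeping an at-start-of-segment flag.
import Mathlib
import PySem

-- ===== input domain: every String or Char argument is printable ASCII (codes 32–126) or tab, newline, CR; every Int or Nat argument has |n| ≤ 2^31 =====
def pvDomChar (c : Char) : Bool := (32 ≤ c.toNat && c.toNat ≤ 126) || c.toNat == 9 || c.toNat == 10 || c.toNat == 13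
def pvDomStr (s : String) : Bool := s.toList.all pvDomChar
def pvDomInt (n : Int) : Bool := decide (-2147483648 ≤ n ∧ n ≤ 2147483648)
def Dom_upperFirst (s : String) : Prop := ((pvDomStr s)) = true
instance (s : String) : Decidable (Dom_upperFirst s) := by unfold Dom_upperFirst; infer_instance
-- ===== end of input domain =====

-- B replaces A's split + string-concatenating recursion by one flat scan with an
-- at-start-of-segment flag (objective: alternative decomposition, same result).

-- ===== PORT A =====

-- hand port of s.split('_') (single-char separator), step for step, exact on all inputs
def pySplitU : List Char → List (List Char)
  | [] => [[]]
  | c :: cs =>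
    if c = '_' then [] :: pySplitU cs
    else
      match pySplitU cs with
      | t :: ts => (c :: t) :: ts
      | [] => [[c]]

theorem pySplitU_ne_nil (s : List Char) : pySplitU s ≠ [] := by
  induction s with
  | nil => simp [pySplitU]
  | cons c cs _ =>
    simp only [pySplitU]
    split
    · simp
    · cases h : pySplitU cs with
      | nil => simp
      | cons t ts => simp

-- every piece is strictly shorter when an underscore is present (for termination)
theorem pySplitU_len (s : List Char) :
    ∀ t ∈ pySplitU s, t.length + s.count '_' ≤ s.length := by
  induction s with
  | nil => intro t ht; simp [pySplitU] at ht; simp [ht]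
  | cons c cs ih =>
    intro t ht
    by_cases hc : c = '_'
    · simp only [pySplitU, if_pos hc, List.mem_cons] at ht
      rcases ht with h | h
      · subst h; subst hc
        simp only [List.count_cons_self, List.length_cons, List.length_nil]
        have := List.count_le_length (l := cs) (a := '_')
        omega
      · have := ih t h
        subst hc
        simp only [List.count_cons_self, List.length_cons]
        omega
    · simp only [pySplitU, if_neg hc] at ht
      cases h : pySplitU cs with
      | nil => exact absurd h (pySplitU_ne_nil cs)
      | cons u us =>
        rw [h, List.mem_cons] at ht
        have hcount : (c :: cs).count '_' = cs.count '_' := by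
          simp [hc]
        rcases ht with h1 | h1
        · subst h1
          have := ih u (by rw [h]; exact List.mem_cons_self)
          simp only [List.length_cons, hcount]
          omega
        · have := ih t (by rw [h]; exact List.mem_cons_of_mem _ h1)
          simp only [List.length_cons, hcount]
          omega

theorem pySplitU_lt {s t : List Char} (hu : '_' ∈ s) (ht : t ∈ pySplitU s) :
    t.length < s.length := by
  have h1 := pySplitU_len s t ht
  have h2 : 1 ≤ s.count '_' := List.one_le_count_iff.mpr hu
  omega

-- literal transliteration of A on the character list
def upperFirstA (s : List Char) : List Char :=
  if s.length = 0 ∨ s.length = 1 then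
    PySem.Chars.upper s
  else if h : '_' ∈ s then
    -- items = s.split('_'); name = ''; for item in items: name += upperFirst(item)
    (pySplitU s).attach.foldl (fun name item => name ++ upperFirstA item.1) []
  else
    -- s[0].upper() + s[1:]
    PySem.Chars.upperChar s.head! :: PySem.List.slice s (some 1) none
termination_by s.length
decreasing_by exact pySplitU_lt h item.2

def upperFirst (s : String) : String := String.ofList (upperFirstA s.toList)

-- ===== PORT B =====

-- one pass; atStart is True at the start and after each '_'
def bGo (atStart : Bool) : List Char → List Char
  | [] => []
  | c :: cs =>
    if c = '_' then bGo true cs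
    else if atStart then PySem.Chars.upperChar c :: bGo false cs
    else c :: bGo false cs

def upperFirst_alt (s : String) : String :=
  if s.length ≤ 1 then PySem.Str.upper s
  else String.ofList (bGo true s.toList)

-- ===== PRECONDITION & SPEC =====
def Spec_upperFirst (s : String) (out : String) : Prop := out = upperFirst_alt s
instance (s : String) (out : String) : Decidable (Spec_upperFirst s out) := by unfold Spec_upperFirst; infer_instance

-- ===== CLAIM (what is proved, stated in full; the proofs are below) =====
def Claim_equal_upperFirst : Prop := ∀ (s : String), Dom_upperFirst s → Spec_upperFirst s (upperFirst s)

-- ===== LEMMAS AND PROOFS =====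

-- no piece contains an underscore
theorem pySplitU_noU (s : List Char) : ∀ t ∈ pySplitU s, '_' ∉ t := by
  induction s with
  | nil => intro t ht; simp [pySplitU] at ht; simp [ht]
  | cons c cs ih =>
    intro t ht
    by_cases hc : c = '_'
    · simp only [pySplitU, if_pos hc, List.mem_cons] at ht
      rcases ht with h | h
      · subst h; simp
      · exact ih t h
    · simp only [pySplitU, if_neg hc] at ht
      cases h : pySplitU cs with
      | nil => exact absurd h (pySplitU_ne_nil cs)
      | cons u us =>
        rw [h, List.mem_cons] at ht
        rcases ht with h1 | h1
        · subst h1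
          have := ih u (by rw [h]; exact List.mem_cons_self)
          simp only [List.mem_cons]
          rintro (h2 | h2)
          · exact hc h2.symm
          · exact this h2
        · exact ih t (by rw [h]; exact List.mem_cons_of_mem _ h1)


theorem bGo_noU {s : List Char} (h : '_' ∉ s) : bGo false s = s := by
  induction s with
  | nil => simp [bGo]
  | cons c cs ih =>
    simp only [List.mem_cons, not_or] at h
    simp [bGo, Ne.symm h.1, ih h.2]

-- splitting the scan at the first piece
theorem bGo_split (s : List Char) (a : Bool) :
    bGo a s = bGo a (pySplitU s).head! ++ (((pySplitU s).tail.map (bGo true)).flatten) := by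
  induction s generalizing a with
  | nil => simp [pySplitU, bGo]
  | cons c cs ih =>
    by_cases hc : c = '_'
    · subst hc
      simp only [pySplitU, bGo]
      rw [ih true]
      cases h : pySplitU cs with
      | nil => exact absurd h (pySplitU_ne_nil cs)
      | cons t ts => simp [bGo]
    · simp only [pySplitU, if_neg hc]
      cases h : pySplitU cs with
      | nil => exact absurd h (pySplitU_ne_nil cs)
      | cons t ts =>
        have := ih false
        rw [h] at this
        simp only [List.head!_cons, List.tail_cons] at this
        by_cases ha : a <;>
          simp [bGo, hc, ha, this, List.cons_append]

theorem bGo_flatten (s : List Char) :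
    bGo true s = ((pySplitU s).map (bGo true)).flatten := by
  rw [bGo_split s true]
  cases h : pySplitU s with
  | nil => exact absurd h (pySplitU_ne_nil s)
  | cons t ts => simp

-- the for-loop accumulator is a flatten of the recursive results
theorem foldl_append_flatten {α β : Type} (f : α → List β) (l : List α) (init : List β) :
    l.foldl (fun acc x => acc ++ f x) init = init ++ (l.map f).flatten := by
  induction l generalizing init with
  | nil => simp
  | cons x xs ih => simp [List.foldl_cons, ih, List.append_assoc]

-- A on a character list equals B's core
theorem upperFirstA_eq : ∀ (n : Nat) (s : List Char), s.length ≤ n →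
    upperFirstA s = if s.length ≤ 1 then PySem.Chars.upper s else bGo true s := by
  intro n
  induction n with
  | zero =>
    intro s hs
    have : s = [] := List.eq_nil_of_length_eq_zero (Nat.le_zero.mp hs)
    subst this
    simp [upperFirstA, PySem.Chars.upper]
  | succ n ih =>
    intro s hs
    by_cases h1 : s.length = 0 ∨ s.length = 1
    · rw [upperFirstA, if_pos h1, if_pos (by omega)]
    · rw [upperFirstA, if_neg h1, if_neg (by omega)]
      by_cases h2 : '_' ∈ s
      · rw [dif_pos h2]
        rw [List.foldl_attach (f := fun a (x : List Char) => a ++ upperFirstA x), foldl_append_flatten, List.nil_append, bGo_flatten]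
        congr 1
        apply List.map_congr_left
        intro t ht
        have hlt := pySplitU_lt h2 ht
        have hnoU := pySplitU_noU s t ht
        rw [ih t (by omega)]
        by_cases h3 : t.length ≤ 1
        · rw [if_pos h3]
          match t, h3 with
          | [], _ => simp [PySem.Chars.upper, bGo]
          | [c], _ =>
            have hc : c ≠ '_' := fun h => hnoU (h ▸ List.mem_cons_self)
            simp [PySem.Chars.upper, bGo, hc]
        · rw [if_neg h3]
      · rw [dif_neg h2]
        match s, h1, h2 with
        | c :: cs, h1, h2 =>
          simp only [List.mem_cons, not_or] at h2
          have hc : c ≠ '_' := fun h => h2.1 h.symm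
          simp only [bGo, if_neg hc]
          rw [bGo_noU h2.2]
          rw [PySem.List.slice_from (xs := c :: cs) (a := 1) (by omega)]
          simp

-- ===== VERDICT (by name: the statement is the Claim_ definition above) =====
theorem upperFirst_spec : Claim_equal_upperFirst := by
  intro s _
  unfold Spec_upperFirst upperFirst upperFirst_alt
  rw [upperFirstA_eq s.toList.length s.toList le_rfl]
  have hlen : s.length = s.toList.length := by
    rw [← String.length_toList]
  by_cases h : s.toList.length ≤ 1
  · rw [if_pos h, if_pos (by omega)]
    simp [PySem.Str.upper]
  · rw [if_neg h, if_neg (by omega)]
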